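-- pv_equiv track=rewrite | github.com/Tomodovodoo/CodeSignal | Tests/02_meeting_room_scheduler.py | freeHandler
-- ===== SOURCE A (Python) =====
-- def freeHandler(query, agenda):
--     room = str(query[1])
--     start = int(query[2])
--     end = int(query[3])
--
--     if start >= end:
--         return "0"
--
--     # Get room dict values
--     events = agenda.setdefault(room, [])
--
--     free_minutes = end - start
--     unavailableRanges = []
--     for agenda_start, agenda_end, agenda_title in events:
--         ss = max(start, agenda_start)
--         ee = min(end, agenda_end)
--         if ss < ee:
--             unavailableRanges.append((ss, ee))
--
--     unavailableRanges.sort(key=lambda x: x[0])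
--     removed_minutes = 0
--     current_start = None
--     current_end = None
--     for ss, ee in unavailableRanges:
--         if current_start is None:
--             current_start, current_end = ss, ee
--             continue
--         if ss <= current_end:
--             current_end = max(current_end, ee)
--         else:
--             removed_minutes += current_end - current_start
--             current_start, current_end = ss, ee
--     if current_start is not None and current_end is not None:
--         removed_minutes += current_end - current_start
--
--     return str(free_minutes - removed_minutes)
-- ===== SOURCE B (Python) =====
-- def freeHandler(query, agenda):
--     room = str(query[1])
--     start = int(query[2])
--     end = int(query[3])
--
--     if start >= end:
--         return "0"
--
--     events = agenda.setdefault(room, [])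
--
--     # Boundary sweep: encode each clipped busy range as two integer boundary
--     # events, 2*ss (opening) and 2*ee + 1 (closing); a plain integer sort then
--     # puts an opening at t before a closing at t, so touching ranges merge.
--     bounds = []
--     for s, e, _ in events:
--         ss = max(start, s)
--         ee = min(end, e)
--         if ss < ee:
--             bounds.append(2 * ss)
--             bounds.append(2 * ee + 1)
--     bounds.sort()
--
--     covered = 0
--     depth = 0
--     mark = start
--     for b in bounds:
--         if b % 2 == 0:
--             if depth == 0:
--                 mark = b // 2
--             depth += 1
--         else:
--             depth -= 1
--             if depth == 0:
--                 covered += b // 2 - mark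
--
--     return str((end - start) - covered)
-- ===== Notes on version B (the rewrite author's own statement) =====
-- stated objective: alternative
-- what changed: A sorts the clipped busy ranges by start and merges overlapping ranges in a sweep carrying a pending (current_start, current_end) interval; B never merges intervals: it encodes each clipped range as two integer boundary events (2*ss opening, 2*ee+1 closing), sorts the flat boundary list, and walks it with a depth counter, adding a block's length whenever the depth returns to zero.
import Mathlib
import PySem

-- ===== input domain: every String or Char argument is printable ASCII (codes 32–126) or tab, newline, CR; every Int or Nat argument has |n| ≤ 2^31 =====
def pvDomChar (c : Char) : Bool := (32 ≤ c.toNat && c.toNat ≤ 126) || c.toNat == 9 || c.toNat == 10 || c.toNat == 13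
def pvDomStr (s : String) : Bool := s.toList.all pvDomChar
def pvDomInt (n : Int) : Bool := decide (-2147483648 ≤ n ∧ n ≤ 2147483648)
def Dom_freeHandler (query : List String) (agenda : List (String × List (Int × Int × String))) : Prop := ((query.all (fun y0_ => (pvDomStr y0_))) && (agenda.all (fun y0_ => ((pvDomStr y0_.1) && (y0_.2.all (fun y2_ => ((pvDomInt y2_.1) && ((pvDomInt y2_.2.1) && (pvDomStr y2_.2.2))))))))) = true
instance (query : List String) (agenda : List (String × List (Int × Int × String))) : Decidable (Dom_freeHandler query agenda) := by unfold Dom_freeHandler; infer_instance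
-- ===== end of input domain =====

-- B replaces A's sort-and-merge of clipped intervals by a boundary sweep: each clipped range becomes
-- two integer boundary events (2*ss opening, 2*ee+1 closing), the flat boundary list is sorted and
-- walked with a depth counter; a block's length is added when the depth returns to zero. Objective: alternative.
-- Both A and B mutate `agenda` identically via setdefault; the equivalence proved is about the return value.


-- ===== PORT A =====
-- A's merge step: state (removed_minutes, current interval or none)
def mergeStep (st : Int × Option (Int × Int)) (r : Int × Int) : Int × Option (Int × Int) :=
  match st.2 with
  | none => (st.1, some r)
  | some (cs, ce) =>
    if r.1 ≤ ce then (st.1, some (cs, max ce r.2))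
    else (st.1 + ce - cs, some r)

def freeHandler (query : List String) (agenda : List (String × List (Int × Int × String))) : String :=
  match PySem.List.pyGet? query 1 with
  | none => ""
  | some room =>
    match (PySem.List.pyGet? query 2).bind PySem.Int.ofStr?,
          (PySem.List.pyGet? query 3).bind PySem.Int.ofStr? with
    | some start, some stop =>
      if start ≥ stop then "0"
      else
        let events := (PySem.Dict.mk agenda).getD room []
        let freeMinutes := stop - start
        let unavailableRanges := events.foldl (fun acc ev =>
          if max start ev.1 < min stop ev.2.1 then acc ++ [(max start ev.1, min stop ev.2.1)] else acc) []
        let sortedR := PySem.List.sorted unavailableRanges (fun x => x.1) false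
        let st := sortedR.foldl mergeStep (0, none)
        let removed := match st.2 with
          | some (cs, ce) => st.1 + ce - cs
          | none => st.1
        PySem.Int.toStr (freeMinutes - removed)
    | _, _ => ""

-- ===== PORT B =====
-- B's sweep step: state (covered, depth, mark); even boundary 2*t opens at t, odd boundary 2*t+1 closes at t
def sweepStep (st : Int × Int × Int) (b : Int) : Int × Int × Int :=
  if PySem.Int.mod b 2 = 0 then
    (st.1, st.2.1 + 1, if st.2.1 = 0 then PySem.Int.floordiv b 2 else st.2.2)
  else
    if st.2.1 - 1 = 0 then (st.1 + (PySem.Int.floordiv b 2 - st.2.2), st.2.1 - 1, st.2.2)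
    else (st.1, st.2.1 - 1, st.2.2)

def freeHandler_alt (query : List String) (agenda : List (String × List (Int × Int × String))) : String :=
  (((PySem.List.pyGet? query 1).bind fun room =>
    ((PySem.List.pyGet? query 2).bind PySem.Int.ofStr?).bind fun start =>
    ((PySem.List.pyGet? query 3).bind PySem.Int.ofStr?).bind fun stop =>
    some <|
    if start ≥ stop then "0"
    else
      let events := (PySem.Dict.mk agenda).getD room []
      let bounds := events.foldl (fun acc ev =>
        if max start ev.1 < min stop ev.2.1 then
          acc ++ [2 * max start ev.1, 2 * min stop ev.2.1 + 1] else acc) []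
      let sortedB := PySem.List.sorted bounds (fun x => x) false
      let st := sortedB.foldl sweepStep (0, 0, start)
      PySem.Int.toStr ((stop - start) - st.1)) : Option String).getD ""

-- ===== PRECONDITION & SPEC =====
-- Pre_ excludes exactly the inputs where Python A raises: query shorter than 4 (IndexError)
-- or query[2]/query[3] not parseable by int() (ValueError).
def Pre_freeHandler (query : List String) (agenda : List (String × List (Int × Int × String))) : Prop :=
  4 ≤ query.length ∧
  ((PySem.List.pyGet? query 2).bind PySem.Int.ofStr?).isSome = true ∧
  ((PySem.List.pyGet? query 3).bind PySem.Int.ofStr?).isSome = true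
instance (query : List String) (agenda : List (String × List (Int × Int × String))) : Decidable (Pre_freeHandler query agenda) := by unfold Pre_freeHandler; infer_instance

def pvWitness_freeHandler : List String × (List (String × List (Int × Int × String))) :=
  (["book", "roomA", "0", "10"], [("roomA", [(2, 5, "standup")])])

def Spec_freeHandler (query : List String) (agenda : List (String × List (Int × Int × String))) (out : String) : Prop := out = freeHandler_alt query agenda
instance (query : List String) (agenda : List (String × List (Int × Int × String))) (out : String) : Decidable (Spec_freeHandler query agenda out) := by unfold Spec_freeHandler; infer_instance

-- ===== CLAIM (what is proved, stated in full; the proofs are below) =====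
def Claim_equal_freeHandler : Prop := ∀ (query : List String) (agenda : List (String × List (Int × Int × String))), Dom_freeHandler query agenda → Pre_freeHandler query agenda → Spec_freeHandler query agenda (freeHandler query agenda)

-- ===== LEMMAS AND PROOFS =====

-- A's merge scan, written as a recursive function of the current block (m, M) over the rest:
def mrun (m M : Int) : List (Int × Int) → Int
  | [] => M - m
  | p :: t => if p.1 ≤ M then mrun m (max M p.2) t else (M - m) + mrun p.1 p.2 t

def mtot : List (Int × Int) → Int
  | [] => 0
  | p :: t => mrun p.1 p.2 t

-- encoding of one clipped range as its two boundary events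
def enc (p : Int × Int) : List Int := [2 * p.1, 2 * p.2 + 1]

lemma mod2_even (s : Int) : PySem.Int.mod (2 * s) 2 = 0 := by
  rw [PySem.Int.mod_eq_emod_of_pos (by norm_num : (0 : Int) < 2)]; omega

lemma mod2_odd (e : Int) : PySem.Int.mod (2 * e + 1) 2 = 1 := by
  rw [PySem.Int.mod_eq_emod_of_pos (by norm_num : (0 : Int) < 2)]; omega

lemma div2_even (s : Int) : PySem.Int.floordiv (2 * s) 2 = s := by
  rw [PySem.Int.floordiv_eq_ediv_of_pos (by norm_num : (0 : Int) < 2)]; omega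

lemma div2_odd (e : Int) : PySem.Int.floordiv (2 * e + 1) 2 = e := by
  rw [PySem.Int.floordiv_eq_ediv_of_pos (by norm_num : (0 : Int) < 2)]; omega

lemma merge_fold_run : ∀ (t : List (Int × Int)) (r cs ce : Int),
    (match (t.foldl mergeStep (r, some (cs, ce))).2 with
     | some (a, b) => (t.foldl mergeStep (r, some (cs, ce))).1 + b - a
     | none => (t.foldl mergeStep (r, some (cs, ce))).1) = r + mrun cs ce t := by
  intro t
  induction t with
  | nil =>
    intro r cs ce
    show r + ce - cs = r + mrun cs ce []
    simp only [mrun]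
    omega
  | cons p t ih =>
    intro r cs ce
    obtain ⟨ss, ee⟩ := p
    simp only [List.foldl_cons]
    have hstep : mergeStep (r, some (cs, ce)) (ss, ee) =
        if ss ≤ ce then (r, some (cs, max ce ee)) else (r + ce - cs, some (ss, ee)) := by
      simp [mergeStep]
    rw [hstep]
    by_cases h : ss ≤ ce
    · rw [if_pos h, ih]
      simp only [mrun, h, if_pos]
    · rw [if_neg h, ih]
      simp only [mrun, h, if_false]
      omega

lemma merge_fold_tot (S : List (Int × Int)) :
    (match (S.foldl mergeStep (0, none)).2 with
     | some (a, b) => (S.foldl mergeStep (0, none)).1 + b - a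
     | none => (S.foldl mergeStep (0, none)).1) = mtot S := by
  cases S with
  | nil => simp [mtot]
  | cons p t =>
    obtain ⟨ss, ee⟩ := p
    show (match (t.foldl mergeStep (0, some (ss, ee))).2 with
     | some (a, b) => (t.foldl mergeStep (0, some (ss, ee))).1 + b - a
     | none => (t.foldl mergeStep (0, some (ss, ee))).1) = mtot ((ss, ee) :: t)
    rw [merge_fold_run t 0 ss ee]
    simp [mtot]

-- A's append-accumulating clipping loop builds exactly the filterMap of the clipping function.
lemma clip_lists (start stop : Int) (events : List (Int × Int × String)) :
    events.foldl (fun acc ev =>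
      if max start ev.1 < min stop ev.2.1 then acc ++ [(max start ev.1, min stop ev.2.1)] else acc)
      ([] : List (Int × Int)) =
    events.filterMap (fun ev =>
      if max start ev.1 < min stop ev.2.1 then some (max start ev.1, min stop ev.2.1) else none) := by
  have h : ∀ (l : List (Int × Int × String)) (acc : List (Int × Int)),
      l.foldl (fun acc ev =>
        if max start ev.1 < min stop ev.2.1 then acc ++ [(max start ev.1, min stop ev.2.1)] else acc) acc =
      acc ++ l.filterMap (fun ev =>
        if max start ev.1 < min stop ev.2.1 then some (max start ev.1, min stop ev.2.1) else none) := by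
    intro l
    induction l with
    | nil => simp
    | cons ev t ih =>
      intro acc
      simp only [List.foldl_cons, List.filterMap_cons]
      by_cases hc : max start ev.1 < min stop ev.2.1
      · rw [if_pos hc, ih]; simp [hc]
      · rw [if_neg hc, ih]; simp [hc]
  simpa using h events []

-- B's boundary-building loop builds the flatMap of enc over the same filterMap.
lemma bounds_lists (start stop : Int) (events : List (Int × Int × String)) :
    events.foldl (fun acc ev =>
      if max start ev.1 < min stop ev.2.1 then
        acc ++ [2 * max start ev.1, 2 * min stop ev.2.1 + 1] else acc) ([] : List Int) =
    (events.filterMap (fun ev =>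
      if max start ev.1 < min stop ev.2.1 then some (max start ev.1, min stop ev.2.1) else none)).flatMap enc := by
  have h : ∀ (l : List (Int × Int × String)) (acc : List Int),
      l.foldl (fun acc ev =>
        if max start ev.1 < min stop ev.2.1 then
          acc ++ [2 * max start ev.1, 2 * min stop ev.2.1 + 1] else acc) acc =
      acc ++ (l.filterMap (fun ev =>
        if max start ev.1 < min stop ev.2.1 then some (max start ev.1, min stop ev.2.1) else none)).flatMap enc := by
    intro l
    induction l with
    | nil => simp
    | cons ev t ih =>
      intro acc
      simp only [List.foldl_cons, List.filterMap_cons]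
      by_cases hc : max start ev.1 < min stop ev.2.1
      · rw [if_pos hc, ih]; simp [hc, enc]
      · rw [if_neg hc, ih]; simp [hc]
  simpa using h events []

-- every boundary of a list of ranges starting at or after lo is at least 2*lo
lemma bnds_lb (lo : Int) (t : List (Int × Int)) (h1 : ∀ q ∈ t, lo ≤ q.1)
    (h2 : ∀ q ∈ t, q.1 < q.2) : ∀ y ∈ t.flatMap enc, 2 * lo ≤ y := by
  intro y hy
  obtain ⟨q, hq, hyq⟩ := List.mem_flatMap.mp hy
  have ha := h1 q hq
  have hb := h2 q hq
  simp only [enc, List.mem_cons, List.not_mem_nil, or_false] at hyq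
  rcases hyq with rfl | rfl <;> omega

-- one sweep step on an opening boundary
lemma sweep_open (c m s : Int) (k : Nat) :
    sweepStep (c, ((k : Nat) : Int), m) (2 * s) =
      (c, (((k + 1 : Nat) : Nat) : Int), if k = 0 then s else m) := by
  have hadd : ((k : Nat) : Int) + 1 = (((k + 1 : Nat) : Nat) : Int) := by push_cast; ring
  simp only [sweepStep, mod2_even, if_pos, div2_even, hadd]
  cases k with
  | zero => simp
  | succ k' =>
    simp
    all_goals (intro hcon; omega)

-- one sweep step on a closing boundary
lemma sweep_close (c m e : Int) (k : Nat) :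
    sweepStep (c, (((k + 1 : Nat) : Nat) : Int), m) (2 * e + 1) =
      if k = 0 then (c + (e - m), ((k : Nat) : Int), m) else (c, ((k : Nat) : Int), m) := by
  have hmod : PySem.Int.mod (2 * e + 1) 2 = 1 := mod2_odd e
  have hsub : (((k + 1 : Nat) : Nat) : Int) - 1 = ((k : Nat) : Int) := by push_cast; ring
  simp only [sweepStep, hmod, div2_odd, hsub]
  cases k with
  | zero => simp
  | succ k' =>
    simp
    all_goals (intro hcon; omega)

-- the main simulation: sweeping the sorted boundary multiset of pending ends E plus the ranges t
-- computes exactly A's merge recursion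
lemma sweep_main : ∀ (n : Nat) (E : List Int) (t : List (Int × Int)) (c m M : Int),
    E.length + 2 * t.length ≤ n →
    E.Pairwise (· ≤ ·) →
    t.Pairwise (fun a b => a.1 ≤ b.1) →
    (∀ p ∈ t, p.1 < p.2) →
    (E = [] ∨ (M ∈ E ∧ ∀ e ∈ E, e ≤ M)) →
    ∃ m', (PySem.List.sorted (E.map (fun e => 2 * e + 1) ++ t.flatMap enc) (fun x => x) false).foldl
            sweepStep (c, (E.length : Int), m)
          = (c + (if E = [] then mtot t else mrun m M t), 0, m') := by
  intro n
  induction n with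
  | zero =>
    intro E t c m M hn hE ht hpos hM
    have hEnil : E = [] := by cases E <;> simp_all
    have htnil : t = [] := by cases t <;> simp_all
    subst hEnil htnil
    refine ⟨m, ?_⟩
    have hs : PySem.List.sorted (([] : List Int)) (fun x => x) false = [] :=
      (PySem.List.sorted_eq_nil_iff _ _ _).mpr rfl
    simp [hs, mtot]
  | succ n ih =>
    intro E t c m M hn hE ht hpos hM
    cases E with
    | nil =>
      cases t with
      | nil =>
        refine ⟨m, ?_⟩
        have hs : PySem.List.sorted (([] : List Int)) (fun x => x) false = [] :=
          (PySem.List.sorted_eq_nil_iff _ _ _).mpr rfl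
        simp [hs, mtot]
      | cons p t' =>
        obtain ⟨ss, ee⟩ := p
        have hps : ss < ee := hpos (ss, ee) (by simp)
        have ht' : t'.Pairwise (fun a b => a.1 ≤ b.1) := (List.pairwise_cons.mp ht).2
        have hts : ∀ q ∈ t', ss ≤ q.1 := fun q hq => (List.pairwise_cons.mp ht).1 q hq
        have hpos' : ∀ q ∈ t', q.1 < q.2 := fun q hq => hpos q (by simp [hq])
        -- the minimal boundary is the opening 2*ss
        have htailpair : (PySem.List.sorted ([ee].map (fun e => 2 * e + 1) ++ t'.flatMap enc)
            (fun x => x) false).Pairwise (· ≤ ·) := by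
          exact PySem.List.sorted_pairwise ([ee].map (fun e => 2 * e + 1) ++ t'.flatMap enc) (fun x => x)
        have hsort : PySem.List.sorted (([] : List Int).map (fun e => 2 * e + 1) ++
              ((ss, ee) :: t').flatMap enc) (fun x => x) false =
            2 * ss :: PySem.List.sorted ([ee].map (fun e => 2 * e + 1) ++ t'.flatMap enc) (fun x => x) false := by
          apply PySem.List.sorted_id_eq_of_perm_of_pairwise
          · have h1 : (PySem.List.sorted ([ee].map (fun e => 2 * e + 1) ++ t'.flatMap enc) (fun x => x) false).Perm
                ((2 * ee + 1) :: t'.flatMap enc) := by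
              simpa using PySem.List.sorted_perm ([ee].map (fun e => 2 * e + 1) ++ t'.flatMap enc) (fun x => x) false
            have := h1.cons (2 * ss)
            simpa [enc] using this
          · rw [List.pairwise_cons]
            refine ⟨?_, htailpair⟩
            intro y hy
            rw [PySem.List.mem_sorted] at hy
            rcases List.mem_append.mp hy with hy | hy
            · obtain ⟨e, he, rfl⟩ := List.mem_map.mp hy
              simp only [List.mem_singleton] at he
              omega
            · exact bnds_lb ss t' hts hpos' y hy
        rw [hsort, List.foldl_cons]
        have h0 : ((List.length ([] : List Int)) : Int) = (((0 : Nat) : Nat) : Int) := by simp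
        rw [h0, sweep_open c m ss 0]
        have hrec := ih [ee] t' c ss ee (by simp at hn ⊢; omega) (by simp)
          ht' hpos' (Or.inr (by simp))
        obtain ⟨m', hm'⟩ := hrec
        refine ⟨m', ?_⟩
        have hlen : ((List.length [ee] : Nat) : Int) = (((0 + 1 : Nat) : Nat) : Int) := by simp
        rw [hlen] at hm'
        rw [show (if (0 : Nat) = 0 then ss else m) = ss from by simp]
        rw [hm']
        simp [mtot]
    | cons e0 E'' =>
      have hMem : M ∈ e0 :: E'' ∧ ∀ e ∈ e0 :: E'', e ≤ M := hM.resolve_left (by simp)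
      have he0M : e0 ≤ M := hMem.2 e0 (by simp)
      have he0le : ∀ e ∈ E'', e0 ≤ e := (List.pairwise_cons.mp hE).1
      have hE'' : E''.Pairwise (· ≤ ·) := (List.pairwise_cons.mp hE).2
      have hEne : ¬(e0 :: E'' = []) := by simp
      have hlenE : ((List.length (e0 :: E'') : Nat) : Int) = (((E''.length + 1 : Nat) : Nat) : Int) := by simp
      have hMtail : E'' ≠ [] → M ∈ E'' ∧ ∀ e ∈ E'', e ≤ M := by
        intro hne
        refine ⟨?_, fun e he => hMem.2 e (by simp [he])⟩
        rcases List.mem_cons.mp hMem.1 with h | h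
        · cases E'' with
          | nil => exact absurd rfl hne
          | cons e1 E3 =>
            have h1 : e1 ≤ M := hMem.2 e1 (by simp)
            have h2 : e0 ≤ e1 := he0le e1 (by simp)
            have : e1 = M := by omega
            simp [this]
        · exact h
      cases t with
      | nil =>
        -- only closings remain
        have htailpair : (PySem.List.sorted (E''.map (fun e => 2 * e + 1) ++
            ([] : List (Int × Int)).flatMap enc) (fun x => x) false).Pairwise (· ≤ ·) := by
          exact PySem.List.sorted_pairwise (E''.map (fun e => 2 * e + 1) ++
            ([] : List (Int × Int)).flatMap enc) (fun x => x)
        have hsort : PySem.List.sorted ((e0 :: E'').map (fun e => 2 * e + 1) ++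
              ([] : List (Int × Int)).flatMap enc) (fun x => x) false =
            (2 * e0 + 1) :: PySem.List.sorted (E''.map (fun e => 2 * e + 1) ++
              ([] : List (Int × Int)).flatMap enc) (fun x => x) false := by
          apply PySem.List.sorted_id_eq_of_perm_of_pairwise
          · have h1 := PySem.List.sorted_perm (E''.map (fun e => 2 * e + 1) ++
              ([] : List (Int × Int)).flatMap enc) (fun x => x) false
            have := h1.cons (2 * e0 + 1)
            simpa using this
          · rw [List.pairwise_cons]
            refine ⟨?_, htailpair⟩
            intro y hy
            rw [PySem.List.mem_sorted] at hy
            simp only [List.flatMap_nil, List.append_nil, List.mem_map] at hy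
            obtain ⟨e, he, rfl⟩ := hy
            have := he0le e he
            omega
        rw [hsort, List.foldl_cons, hlenE, sweep_close c m e0 E''.length]
        cases E'' with
        | nil =>
          rw [if_pos (show List.length ([] : List Int) = 0 from rfl)]
          have hM0 : M = e0 := by simpa using hMem.1
          have hs : PySem.List.sorted (([] : List Int)) (fun x => x) false = [] :=
            (PySem.List.sorted_eq_nil_iff _ _ _).mpr rfl
          refine ⟨m, ?_⟩
          simp only [List.map_nil, List.flatMap_nil, List.append_nil, hs, List.foldl_nil,
            if_neg hEne, mrun, hM0]
          simp
        | cons e1 E3 =>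
          rw [if_neg (by simp : ¬(e1 :: E3).length = 0)]
          have hrec := ih (e1 :: E3) [] c m M (by simp at hn ⊢; omega)
            hE'' (by simp) (by simp) (Or.inr (hMtail (by simp)))
          obtain ⟨m', hm'⟩ := hrec
          refine ⟨m', ?_⟩
          rw [hm']
          simp
      | cons p t' =>
        obtain ⟨ss, ee⟩ := p
        have hps : ss < ee := hpos (ss, ee) (by simp)
        have ht' : t'.Pairwise (fun a b => a.1 ≤ b.1) := (List.pairwise_cons.mp ht).2
        have hts : ∀ q ∈ t', ss ≤ q.1 := fun q hq => (List.pairwise_cons.mp ht).1 q hq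
        have hpos' : ∀ q ∈ t', q.1 < q.2 := fun q hq => hpos q (by simp [hq])
        have htsc : ∀ q ∈ (ss, ee) :: t', ss ≤ q.1 := by
          intro q hq
          rcases List.mem_cons.mp hq with rfl | hq
          · simp
          · exact hts q hq
        by_cases hcmp : ss ≤ e0
        · -- the opening 2*ss comes first; push ee into the pending ends
          set E2 := PySem.List.sorted (ee :: e0 :: E'') (fun x => x) false with hE2def
          have hE2perm : E2.Perm (ee :: e0 :: E'') := PySem.List.sorted_perm _ _ _
          have hE2len : E2.length = E''.length + 2 := by simpa using hE2perm.length_eq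
          have hE2mem : ∀ x, x ∈ E2 ↔ x ∈ ee :: e0 :: E'' := fun x => by
            rw [hE2def, PySem.List.mem_sorted]
          have htailpair : (PySem.List.sorted (E2.map (fun e => 2 * e + 1) ++ t'.flatMap enc)
              (fun x => x) false).Pairwise (· ≤ ·) := by
            exact PySem.List.sorted_pairwise (E2.map (fun e => 2 * e + 1) ++ t'.flatMap enc) (fun x => x)
          have hsort : PySem.List.sorted ((e0 :: E'').map (fun e => 2 * e + 1) ++
                ((ss, ee) :: t').flatMap enc) (fun x => x) false =
              2 * ss :: PySem.List.sorted (E2.map (fun e => 2 * e + 1) ++ t'.flatMap enc) (fun x => x) false := by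
            apply PySem.List.sorted_id_eq_of_perm_of_pairwise
            · have h1 : (PySem.List.sorted (E2.map (fun e => 2 * e + 1) ++ t'.flatMap enc) (fun x => x) false).Perm
                  (E2.map (fun e => 2 * e + 1) ++ t'.flatMap enc) := PySem.List.sorted_perm _ _ _
              have h2 : (E2.map (fun e => 2 * e + 1)).Perm ((ee :: e0 :: E'').map (fun e => 2 * e + 1)) :=
                hE2perm.map _
              have h3 : (E2.map (fun e => 2 * e + 1) ++ t'.flatMap enc).Perm
                  ((2 * ee + 1) :: ((e0 :: E'').map (fun e => 2 * e + 1) ++ t'.flatMap enc)) := by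
                simpa using h2.append_right (t'.flatMap enc)
              have h4 : (2 * ss :: PySem.List.sorted (E2.map (fun e => 2 * e + 1) ++ t'.flatMap enc) (fun x => x) false).Perm
                  (2 * ss :: (2 * ee + 1) :: ((e0 :: E'').map (fun e => 2 * e + 1) ++ t'.flatMap enc)) :=
                (h1.trans h3).cons (2 * ss)
              refine h4.trans ?_
              have h5 : ((e0 :: E'').map (fun e => 2 * e + 1) ++ (2 * ee + 1) :: t'.flatMap enc).Perm
                  ((2 * ee + 1) :: ((e0 :: E'').map (fun e => 2 * e + 1) ++ t'.flatMap enc)) :=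
                List.perm_middle
              have h6 : ((e0 :: E'').map (fun e => 2 * e + 1) ++ 2 * ss :: (2 * ee + 1) :: t'.flatMap enc).Perm
                  (2 * ss :: ((e0 :: E'').map (fun e => 2 * e + 1) ++ (2 * ee + 1) :: t'.flatMap enc)) :=
                List.perm_middle
              have h7 := (h5.cons (2 * ss)).symm.trans h6.symm
              simpa [enc] using h7
            · rw [List.pairwise_cons]
              refine ⟨?_, htailpair⟩
              intro y hy
              rw [PySem.List.mem_sorted] at hy
              rcases List.mem_append.mp hy with hy | hy
              · obtain ⟨e, he, rfl⟩ := List.mem_map.mp hy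
                rcases List.mem_cons.mp ((hE2mem e).mp he) with rfl | he2
                · omega
                · rcases List.mem_cons.mp he2 with rfl | he3
                  · omega
                  · have := he0le e he3; omega
              · exact bnds_lb ss t' hts hpos' y hy
          have hMax : max M ee ∈ E2 ∧ ∀ e ∈ E2, e ≤ max M ee := by
            constructor
            · rcases max_choice M ee with h | h
              · rw [h, hE2mem]
                simp only [List.mem_cons]
                right
                exact List.mem_cons.mp hMem.1
              · rw [h, hE2mem]; simp
            · intro e he
              rcases List.mem_cons.mp ((hE2mem e).mp he) with rfl | he2
              · exact le_max_right _ _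
              · rcases List.mem_cons.mp he2 with rfl | he3
                · exact le_trans he0M (le_max_left _ _)
                · exact le_trans (hMem.2 e (by simp [he3])) (le_max_left _ _)
          rw [hsort, List.foldl_cons, hlenE, sweep_open c m ss (E''.length + 1)]
          rw [if_neg (by omega : ¬(E''.length + 1 = 0))]
          have hrec := ih E2 t' c m (max M ee)
            (by rw [hE2len]; simp at hn ⊢; omega)
            (by exact PySem.List.sorted_pairwise (ee :: e0 :: E'') (fun x => x))
            ht' hpos' (Or.inr hMax)
          obtain ⟨m', hm'⟩ := hrec
          refine ⟨m', ?_⟩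
          have hcast : ((E2.length : Nat) : Int) = (((E''.length + 1 + 1 : Nat) : Nat) : Int) := by
            rw [hE2len]
          rw [hcast] at hm'
          rw [hm']
          have hE2ne : ¬(E2 = []) := by
            intro h; rw [h] at hE2len; simp at hE2len
          have hssM : ss ≤ M := le_trans hcmp he0M
          simp only [if_neg hE2ne, if_neg hEne]
          rw [mrun]
          simp only [hssM, if_pos]
        · -- the closing 2*e0+1 comes first
          have he0ss : e0 < ss := by omega
          have htailpair : (PySem.List.sorted (E''.map (fun e => 2 * e + 1) ++
              ((ss, ee) :: t').flatMap enc) (fun x => x) false).Pairwise (· ≤ ·) := by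
            exact PySem.List.sorted_pairwise (E''.map (fun e => 2 * e + 1) ++
              ((ss, ee) :: t').flatMap enc) (fun x => x)
          have hsort : PySem.List.sorted ((e0 :: E'').map (fun e => 2 * e + 1) ++
                ((ss, ee) :: t').flatMap enc) (fun x => x) false =
              (2 * e0 + 1) :: PySem.List.sorted (E''.map (fun e => 2 * e + 1) ++
                ((ss, ee) :: t').flatMap enc) (fun x => x) false := by
            apply PySem.List.sorted_id_eq_of_perm_of_pairwise
            · have h1 := PySem.List.sorted_perm (E''.map (fun e => 2 * e + 1) ++
                ((ss, ee) :: t').flatMap enc) (fun x => x) false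
              have := h1.cons (2 * e0 + 1)
              simpa using this
            · rw [List.pairwise_cons]
              refine ⟨?_, htailpair⟩
              intro y hy
              rw [PySem.List.mem_sorted] at hy
              rcases List.mem_append.mp hy with hy | hy
              · obtain ⟨e, he, rfl⟩ := List.mem_map.mp hy
                have := he0le e he; omega
              · have := bnds_lb ss ((ss, ee) :: t') htsc hpos y hy
                omega
          rw [hsort, List.foldl_cons, hlenE, sweep_close c m e0 E''.length]
          cases E'' with
          | nil =>
            rw [if_pos (show List.length ([] : List Int) = 0 from rfl)]
            have hM0 : M = e0 := by simpa using hMem.1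
            have hrec := ih [] ((ss, ee) :: t') (c + (e0 - m)) m M
              (by simp at hn ⊢; omega) (by simp) ht hpos (Or.inl rfl)
            obtain ⟨m', hm'⟩ := hrec
            refine ⟨m', ?_⟩
            rw [hm']
            have hne1 : ¬([e0] : List Int) = [] := by simp
            simp only [if_neg hne1, mtot, mrun, hM0,
              if_neg (show ¬ss ≤ e0 by omega), Prod.mk.injEq]
            simp
            ring
          | cons e1 E3 =>
            rw [if_neg (by simp : ¬(e1 :: E3).length = 0)]
            have hrec := ih (e1 :: E3) ((ss, ee) :: t') c m M (by simp at hn ⊢; omega)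
              hE'' ht hpos (Or.inr (hMtail (by simp)))
            obtain ⟨m', hm'⟩ := hrec
            refine ⟨m', ?_⟩
            rw [hm']
            simp

-- ===== VERDICT (by name: the statement is the Claim_ definition above) =====
theorem freeHandler_spec : Claim_equal_freeHandler := by
  intro query agenda _hdom hpre
  obtain ⟨hlen, h2, h3⟩ := hpre
  match query, hlen with
  | q0 :: q1 :: q2 :: q3 :: rest, _ =>
  unfold Spec_freeHandler freeHandler freeHandler_alt
  have hg1 : PySem.List.pyGet? (q0 :: q1 :: q2 :: q3 :: rest) (1 : Int) = some q1 := by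
    have := PySem.List.pyGet?_ofNat (xs := q0 :: q1 :: q2 :: q3 :: rest) (n := 1) (by simp)
    simpa using this
  have hg2 : PySem.List.pyGet? (q0 :: q1 :: q2 :: q3 :: rest) (2 : Int) = some q2 := by
    have := PySem.List.pyGet?_ofNat (xs := q0 :: q1 :: q2 :: q3 :: rest) (n := 2) (by simp)
    simpa using this
  have hg3 : PySem.List.pyGet? (q0 :: q1 :: q2 :: q3 :: rest) (3 : Int) = some q3 := by
    have := PySem.List.pyGet?_ofNat (xs := q0 :: q1 :: q2 :: q3 :: rest) (n := 3) (by simp)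
    simpa using this
  rw [hg2] at h2; rw [hg3] at h3
  obtain ⟨start, hstart⟩ := Option.isSome_iff_exists.mp h2
  obtain ⟨stop, hstop⟩ := Option.isSome_iff_exists.mp h3
  rw [hg1, hg2, hg3]
  simp only [Option.bind_some] at *
  rw [hstart, hstop]
  simp only [Option.bind_some, Option.getD_some]
  by_cases hge : start ≥ stop
  · simp [hge]
  · simp only [hge, if_false]
    rw [clip_lists, bounds_lists]
    set f := fun (ev : Int × Int × String) =>
      if max start ev.1 < min stop ev.2.1 then some (max start ev.1, min stop ev.2.1) else none with hf
    set clipped := ((PySem.Dict.mk agenda).getD q1 []).filterMap f with hclip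
    set S := PySem.List.sorted clipped (fun x => x.1) false with hS
    have hSperm : S.Perm clipped := PySem.List.sorted_perm _ _ _
    -- B sorts the boundaries of the unsorted clipped list; same multiset as the boundaries of S
    have hBsort : PySem.List.sorted (clipped.flatMap enc) (fun x => x) false =
        PySem.List.sorted (([] : List Int).map (fun e => 2 * e + 1) ++ S.flatMap enc) (fun x => x) false := by
      simp only [List.map_nil, List.nil_append]
      exact PySem.List.sorted_eq_sorted_of_perm (clipped.flatMap enc) (S.flatMap enc) (fun x => x)
        (fun a b h => h) ((hSperm.flatMap (fun a _ => List.Perm.refl _)).symm)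
    have hSpair : S.Pairwise (fun a b => a.1 ≤ b.1) := by
      exact PySem.List.sorted_pairwise clipped (fun x => x.1)
    have hSpos : ∀ p ∈ S, p.1 < p.2 := by
      intro p hp
      rw [hS, PySem.List.mem_sorted] at hp
      obtain ⟨ev, _, hev⟩ := List.mem_filterMap.mp hp
      rw [hf] at hev
      by_cases hc : max start ev.1 < min stop ev.2.1
      · simp only [hc, if_pos, Option.some.injEq] at hev
        subst hev
        exact hc
      · simp [hc] at hev
    obtain ⟨m', hm'⟩ := sweep_main (0 + 2 * S.length) [] S 0 start 0 (le_refl _)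
      (by simp) hSpair hSpos (Or.inl rfl)
    simp only [List.length_nil, Nat.cast_zero] at hm'
    rw [hBsort]
    rw [hm']
    rw [merge_fold_tot S]
    simp
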